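-- pv_equiv track=rewrite | github.com/shivam-singh-au17/morning_boostup | may05/subArr.py | oddFinder
-- ===== SOURCE A (Python) =====
-- arr = [1, 2, 3, 4, 5]
--
-- def oddFinder(arr):
--
--     for i in range(0, len(arr)):
--         count = 0
--         result = []
--
--         for j in range(i, len(arr)):
--             result.append(arr[j])
--
--             for k in range(0, len(result)):
--                 if result[k] % 2 == 1 and result[len(result) - 1] % 2 == 1:
--                     count = count + 1
--         return count
-- ===== SOURCE B (Python) =====
-- def oddFinder(arr):
--     # single pass: running count of odds seen so far; each odd element at
--     # position j contributes (number of odds in arr[0..j]) to the total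
--     odd = 0
--     total = 0
--     for x in arr:
--         if x % 2 == 1:
--             odd += 1
--             total += odd
--     return total
-- ===== Notes on version B (the rewrite author's own statement) =====
-- stated objective: faster
-- what changed: Replaced A's nested build-a-prefix-and-rescan-it loops (outer loop returns after i=0) by a single pass that keeps a running count of odd elements and adds it whenever the current element is odd.
-- outside the precondition, e.g. on oddFinder([]): A returns None, B returns 0
import Mathlib
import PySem

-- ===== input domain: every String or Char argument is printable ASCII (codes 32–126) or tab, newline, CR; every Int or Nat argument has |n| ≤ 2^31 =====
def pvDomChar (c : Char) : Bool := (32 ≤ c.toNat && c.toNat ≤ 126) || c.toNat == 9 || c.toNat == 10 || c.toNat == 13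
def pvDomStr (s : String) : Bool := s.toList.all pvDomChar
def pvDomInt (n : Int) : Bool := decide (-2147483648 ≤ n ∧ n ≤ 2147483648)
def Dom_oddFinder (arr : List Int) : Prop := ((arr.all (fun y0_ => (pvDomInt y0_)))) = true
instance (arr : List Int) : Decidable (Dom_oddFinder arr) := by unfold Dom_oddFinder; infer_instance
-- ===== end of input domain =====

-- B replaces A's quadratic prefix-rebuild-and-rescan with one linear pass keeping a running odd count (objective: faster).

-- ===== PORT A =====
-- Python A: outer 'for i in range(0, len(arr))' returns 'count' at the end of its FIRST
-- iteration (i = 0); on an empty list the loop body never runs and A returns None,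
-- which Pre_ excludes (the '[] => 0' arm is never claimed about).
def oddFinder (arr : List Int) : Int :=
  match PySem.List.pyRange 0 (PySem.List.len arr) 1 with
  | [] => 0
  | i :: _ =>
      ((PySem.List.pyRange i (PySem.List.len arr) 1).foldl
        (fun (s : Int × List Int) j =>
          let result := s.2 ++ [PySem.List.pyGetD arr j 0]
          ((PySem.List.pyRange 0 (PySem.List.len result) 1).foldl
            (fun c k =>
              if PySem.Int.mod (PySem.List.pyGetD result k 0) 2 = 1 ∧
                 PySem.Int.mod (PySem.List.pyGetD result (PySem.List.len result - 1) 0) 2 = 1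
              then c + 1 else c) s.1,
           result))
        (0, ([] : List Int))).1

-- ===== PORT B =====
def oddFinder_alt (arr : List Int) : Int :=
  (arr.foldl
    (fun (s : Int × Int) x =>
      if PySem.Int.mod x 2 = 1 then (s.1 + 1, s.2 + s.1 + 1) else s)
    (0, 0)).2

-- ===== PRECONDITION & SPEC =====
-- Pre_ excludes only the empty list, on which Python A falls through its loop and returns None
-- (no int value), while B returns 0.
def Pre_oddFinder (arr : List Int) : Prop := arr ≠ []
instance (arr : List Int) : Decidable (Pre_oddFinder arr) := by unfold Pre_oddFinder; infer_instance
def pvWitness_oddFinder : List Int := [1, 2, 3]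

def Spec_oddFinder (arr : List Int) (out : Int) : Prop := out = oddFinder_alt arr
instance (arr : List Int) (out : Int) : Decidable (Spec_oddFinder arr out) := by unfold Spec_oddFinder; infer_instance

-- ===== CLAIM (what is proved, stated in full; the proofs are below) =====
def Claim_equal_oddFinder : Prop := ∀ (arr : List Int), Dom_oddFinder arr → Pre_oddFinder arr → Spec_oddFinder arr (oddFinder arr)

-- ===== LEMMAS AND PROOFS =====

-- A's inner-loop body as a function of the element fetched by arr[j]
def pvStepA (s : Int × List Int) (x : Int) : Int × List Int :=
  let result := s.2 ++ [x]
  ((PySem.List.pyRange 0 (PySem.List.len result) 1).foldl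
    (fun c k =>
      if PySem.Int.mod (PySem.List.pyGetD result k 0) 2 = 1 ∧
         PySem.Int.mod (PySem.List.pyGetD result (PySem.List.len result - 1) 0) 2 = 1
      then c + 1 else c) s.1,
   result)

-- B's loop body
def pvStepB (s : Int × Int) (x : Int) : Int × Int :=
  if PySem.Int.mod x 2 = 1 then (s.1 + 1, s.2 + s.1 + 1) else s

def pvOdd (y : Int) : Bool := decide (PySem.Int.mod y 2 = 1)

-- result[len(result)-1] is the element just appended
lemma pvLast (res : List Int) (x : Int) :
    PySem.List.pyGetD (res ++ [x]) (PySem.List.len (res ++ [x]) - 1) 0 = x := by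
  have h : PySem.List.len (res ++ [x]) - 1 = ((res.length : Nat) : Int) := by
    simp [PySem.List.len_eq]
  rw [h, PySem.List.pyGetD_natCast]
  simp

lemma pvStepA_eq (res : List Int) (c x : Int) :
    pvStepA (c, res) x =
      ((if PySem.Int.mod x 2 = 1 then c + (res.countP pvOdd : Int) + 1 else c), res ++ [x]) := by
  unfold pvStepA
  simp only [pvLast]
  rw [PySem.List.foldl_pyRange_zero_pyGetD (res ++ [x]) 0
        (fun c y => if PySem.Int.mod y 2 = 1 ∧ PySem.Int.mod x 2 = 1 then c + 1 else c) c]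
  by_cases hx : PySem.Int.mod x 2 = 1
  · have hpx : pvOdd x = true := decide_eq_true hx
    simp only [hx, and_true, if_true]
    have hc := PySem.List.foldl_count_if pvOdd (res ++ [x]) c
    simp only [pvOdd, decide_eq_true_eq] at hc
    rw [hc]
    rw [List.countP_append, List.countP_cons]
    simp [hpx]
    ring
  · simp only [hx, and_false, if_false]
    simp [List.foldl_fixed]

lemma pvMain (l : List Int) : ∀ (res : List Int) (c oc : Int),
    oc = (res.countP pvOdd : Int) →
    (l.foldl pvStepA (c, res)).1 = (l.foldl pvStepB (oc, c)).2 := by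
  induction l with
  | nil => intro res c oc h; simp
  | cons x t ih =>
      intro res c oc h
      subst h
      simp only [List.foldl_cons, pvStepA_eq]
      by_cases hx : PySem.Int.mod x 2 = 1
      · have hpx : pvOdd x = true := decide_eq_true hx
        have hsB : pvStepB ((res.countP pvOdd : Int), c) x
            = ((res.countP pvOdd : Int) + 1, c + (res.countP pvOdd : Int) + 1) := by
          unfold pvStepB; rw [if_pos hx]
        rw [if_pos hx, hsB]
        apply ih
        rw [List.countP_append, List.countP_cons]
        simp [hpx]
      · have hpx : pvOdd x = false := decide_eq_false hx
        have hsB : pvStepB ((res.countP pvOdd : Int), c) x = ((res.countP pvOdd : Int), c) := by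
          unfold pvStepB; rw [if_neg hx]
        rw [if_neg hx, hsB]
        apply ih
        rw [List.countP_append, List.countP_cons]
        simp [hpx]

-- ===== VERDICT (by name: the statement is the Claim_ definition above) =====
theorem oddFinder_spec : Claim_equal_oddFinder := by
  intro arr _ hpre
  unfold Spec_oddFinder oddFinder oddFinder_alt
  have hlen : (0 : Int) < PySem.List.len arr := by
    cases arr with
    | nil => exact absurd rfl hpre
    | cons a t => simp [PySem.List.len_eq]
  rw [PySem.List.pyRange_one_cons hlen]
  simp only []
  rw [show (fun (s : Int × List Int) j =>
        let result := s.2 ++ [PySem.List.pyGetD arr j 0]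
        ((PySem.List.pyRange 0 (PySem.List.len result) 1).foldl
          (fun c k =>
            if PySem.Int.mod (PySem.List.pyGetD result k 0) 2 = 1 ∧
               PySem.Int.mod (PySem.List.pyGetD result (PySem.List.len result - 1) 0) 2 = 1
            then c + 1 else c) s.1,
         result))
      = (fun (s : Int × List Int) j => pvStepA s (PySem.List.pyGetD arr j 0)) from rfl]
  rw [PySem.List.foldl_pyRange_zero_pyGetD arr 0 pvStepA (0, ([] : List Int))]
  rw [show (fun (s : Int × Int) x =>
        if PySem.Int.mod x 2 = 1 then (s.1 + 1, s.2 + s.1 + 1) else s)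
      = pvStepB from rfl]
  exact pvMain arr [] 0 0 (by simp)
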